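-- pv_equiv track=rewrite | github.com/WoosungMichael/Algorithm | Programmers/Python/Level_2/rotatingParentheses.py | solution
-- ===== SOURCE A (Python) =====
-- def solution(s):
--     answer = 0
--     x = len(s)
--     s = s+s
--     for i in range(0, x):
--         tmp = s[i:i+x]
--         arr = []
--         for j in tmp:
--             if j == ']' and len(arr) != 0 and arr[-1] == '[':
--                 del arr[len(arr)-1]
--             elif j == '}' and len(arr) != 0 and arr[-1] == '{':
--                 del arr[len(arr)-1]
--             elif j == ')' and len(arr) != 0 and arr[-1] == '(':
--                 del arr[len(arr)-1]
--             else: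
--                 arr.append(j)
--         if len(arr) == 0:
--             answer += 1
--
--     return answer
-- ===== SOURCE B (Python) =====
-- def _drop_pairs(t, o, c):
--     # one left-to-right pass removing non-overlapping adjacent o,c pairs
--     out = []
--     k = 0
--     while k < len(t):
--         if k + 1 < len(t) and t[k] == o and t[k + 1] == c:
--             k += 2
--         else:
--             out.append(t[k])
--             k += 1
--     return out
--
--
-- def _valid(rot):
--     t = list(rot)
--     while True:
--         u = _drop_pairs(_drop_pairs(_drop_pairs(t, '[', ']'), '{', '}'), '(', ')')
--         if u == t:
--             return t == []
--         t = u
--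
--
-- def solution(s):
--     n = len(s)
--     return sum(_valid(s[i:] + s[:i]) for i in range(n))
-- ===== Notes on version B (the rewrite author's own statement) =====
-- stated objective: alternative
-- what changed: Validity of each rotation is decided by repeatedly deleting adjacent matched bracket pairs until a fixed point and testing for the empty string, instead of A's explicit stack simulation; rotations come from slicing s twice instead of slicing the doubled string s+s.
import Mathlib
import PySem

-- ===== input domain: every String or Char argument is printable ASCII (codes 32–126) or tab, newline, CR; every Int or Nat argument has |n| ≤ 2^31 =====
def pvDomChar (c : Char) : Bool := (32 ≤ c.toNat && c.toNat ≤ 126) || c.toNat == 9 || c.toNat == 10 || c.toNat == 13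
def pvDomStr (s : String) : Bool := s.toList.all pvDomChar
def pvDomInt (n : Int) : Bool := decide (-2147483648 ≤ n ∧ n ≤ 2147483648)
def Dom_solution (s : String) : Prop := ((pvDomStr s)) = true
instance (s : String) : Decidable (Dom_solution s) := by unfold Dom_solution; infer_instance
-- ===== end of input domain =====

-- B replaces A's per-rotation stack simulation by pair-removal to a fixed point; same results, no speed claim.

-- ===== PORT A =====
def stepA (arr : List Char) (j : Char) : List Char :=
  if j = ']' ∧ arr ≠ [] ∧ arr.getLast? = some '[' then arr.dropLast
  else if j = '}' ∧ arr ≠ [] ∧ arr.getLast? = some '{' then arr.dropLast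
  else if j = ')' ∧ arr ≠ [] ∧ arr.getLast? = some '(' then arr.dropLast
  else arr ++ [j]

def solution (s : String) : Int :=
  let x : Int := (s.toList.length : Int)
  let ss := s.toList ++ s.toList
  (PySem.List.pyRange 0 x 1).foldl (fun answer i =>
    let tmp := PySem.List.slice ss (some i) (some (i + x))
    let arr := tmp.foldl stepA []
    if arr = [] then answer + 1 else answer) 0

-- ===== PORT B =====
-- one left-to-right pass removing non-overlapping adjacent (o,c) pairs ( _drop_pairs in Source B )
def dropPairs (o c : Char) : List Char → List Char
  | a :: b :: rest => if a = o ∧ b = c then dropPairs o c rest else a :: dropPairs o c (b :: rest)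
  | l => l

def repl3 (t : List Char) : List Char :=
  dropPairs '(' ')' (dropPairs '{' '}' (dropPairs '[' ']' t))

theorem length_dropPairs_le (o c : Char) : ∀ t : List Char, (dropPairs o c t).length ≤ t.length := by
  intro t
  induction t using dropPairs.induct o c with
  | case1 a b rest hab ih =>
      rw [dropPairs, if_pos hab]
      simp only [List.length_cons]
      omega
  | case2 a b rest h ih =>
      rw [dropPairs, if_neg h]
      simp only [List.length_cons] at ih ⊢
      omega
  | case3 l h =>
      match l with
      | [] => simp [dropPairs]
      | [a] => simp [dropPairs]
      | a :: b :: rest => exact absurd rfl (h a b rest)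

theorem dropPairs_eq_of_length (o c : Char) :
    ∀ t : List Char, (dropPairs o c t).length = t.length → dropPairs o c t = t := by
  intro t
  induction t using dropPairs.induct o c with
  | case1 a b rest hab ih =>
      intro hlen
      exfalso
      have h1 := length_dropPairs_le o c rest
      rw [dropPairs, if_pos hab] at hlen
      simp only [List.length_cons] at hlen
      omega
  | case2 a b rest h ih =>
      intro hlen
      rw [dropPairs, if_neg h] at hlen ⊢
      simp only [List.length_cons] at hlen
      rw [ih (by simp only [List.length_cons]; omega)]
  | case3 l h =>
      intro _
      match l with
      | [] => rfl
      | [a] => rfl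
      | a :: b :: rest => exact absurd rfl (h a b rest)

theorem repl3_length_lt (t : List Char) (h : repl3 t ≠ t) : (repl3 t).length < t.length := by
  by_contra hc
  rw [Nat.not_lt] at hc
  apply h
  have l1 := length_dropPairs_le '[' ']' t
  have l2 := length_dropPairs_le '{' '}' (dropPairs '[' ']' t)
  have l3 := length_dropPairs_le '(' ')' (dropPairs '{' '}' (dropPairs '[' ']' t))
  unfold repl3 at hc ⊢
  have e1 : dropPairs '[' ']' t = t := dropPairs_eq_of_length _ _ _ (by omega)
  rw [e1] at hc l2 l3 ⊢
  have e2 : dropPairs '{' '}' t = t := dropPairs_eq_of_length _ _ _ (by omega)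
  rw [e2] at hc l3 ⊢
  exact dropPairs_eq_of_length _ _ _ (by omega)

-- the while-loop of _valid: iterate repl3 until unchanged
def reduceFix (t : List Char) : List Char :=
  if h : repl3 t = t then t else reduceFix (repl3 t)
termination_by t.length
decreasing_by exact repl3_length_lt t h

def solution_alt (s : String) : Int :=
  let cs := s.toList
  let n : Int := (cs.length : Int)
  (PySem.List.pyRange 0 n 1).foldl (fun acc i =>
    let rot := PySem.List.slice cs (some i) none ++ PySem.List.slice cs none (some i)
    acc + (if reduceFix rot = [] then 1 else 0)) 0

-- ===== PRECONDITION & SPEC =====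
def Spec_solution (s : String) (out : Int) : Prop := out = solution_alt s
instance (s : String) (out : Int) : Decidable (Spec_solution s out) := by unfold Spec_solution; infer_instance

-- ===== CLAIM (what is proved, stated in full; the proofs are below) =====
def Claim_equal_solution : Prop := ∀ (s : String), Dom_solution s → Spec_solution s (solution s)

-- ===== LEMMAS AND PROOFS =====

theorem repl3_fix_parts (t : List Char) (h : repl3 t = t) :
    dropPairs '[' ']' t = t ∧ dropPairs '{' '}' t = t ∧ dropPairs '(' ')' t = t := by
  have hlen : (repl3 t).length = t.length := by rw [h]
  unfold repl3 at hlen h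
  have l1 := length_dropPairs_le '[' ']' t
  have l2 := length_dropPairs_le '{' '}' (dropPairs '[' ']' t)
  have l3 := length_dropPairs_le '(' ')' (dropPairs '{' '}' (dropPairs '[' ']' t))
  have e1 : dropPairs '[' ']' t = t := dropPairs_eq_of_length _ _ _ (by omega)
  rw [e1] at hlen h l2 l3
  have e2 : dropPairs '{' '}' t = t := dropPairs_eq_of_length _ _ _ (by omega)
  rw [e2] at hlen h
  exact ⟨e1, e2, h⟩


-- removing one adjacent matched pair does not change the stack-machine run
theorem foldl_stepA_dropPairs (o c : Char)
    (hO : ∀ arr : List Char, stepA arr o = arr ++ [o])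
    (hC : ∀ arr : List Char, stepA (arr ++ [o]) c = arr) :
    ∀ t : List Char, ∀ arr : List Char,
      (dropPairs o c t).foldl stepA arr = t.foldl stepA arr := by
  intro t
  induction t using dropPairs.induct o c with
  | case1 a b rest hab ih =>
      intro arr
      obtain ⟨ha, hb⟩ := hab
      subst ha; subst hb
      rw [dropPairs, if_pos ⟨rfl, rfl⟩]
      simp only [List.foldl_cons]
      rw [ih arr, hO arr, hC arr]
  | case2 a b rest h ih =>
      intro arr
      rw [dropPairs, if_neg h]
      simp only [List.foldl_cons]
      exact ih (stepA arr a)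
  | case3 l h =>
      intro arr
      match l with
      | [] => rfl
      | [a] => rfl
      | a :: b :: rest => exact absurd rfl (h a b rest)

theorem stepA_open_bracket (arr : List Char) : stepA arr '[' = arr ++ ['['] := by
  simp [stepA]
theorem stepA_open_brace (arr : List Char) : stepA arr '{' = arr ++ ['{'] := by
  simp [stepA]
theorem stepA_open_paren (arr : List Char) : stepA arr '(' = arr ++ ['('] := by
  simp [stepA]
theorem stepA_close_bracket (arr : List Char) : stepA (arr ++ ['[']) ']' = arr := by
  simp [stepA]
theorem stepA_close_brace (arr : List Char) : stepA (arr ++ ['{']) '}' = arr := by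
  simp [stepA]
theorem stepA_close_paren (arr : List Char) : stepA (arr ++ ['(']) ')' = arr := by
  simp [stepA]

theorem foldl_stepA_repl3 (t : List Char) (arr : List Char) :
    (repl3 t).foldl stepA arr = t.foldl stepA arr := by
  unfold repl3
  rw [foldl_stepA_dropPairs '(' ')' stepA_open_paren stepA_close_paren,
      foldl_stepA_dropPairs '{' '}' stepA_open_brace stepA_close_brace,
      foldl_stepA_dropPairs '[' ']' stepA_open_bracket stepA_close_bracket]

theorem foldl_stepA_reduceFix (t : List Char) (arr : List Char) :
    (reduceFix t).foldl stepA arr = t.foldl stepA arr := by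
  induction t using reduceFix.induct with
  | case1 t h => rw [reduceFix, dif_pos h]
  | case2 t h ih => rw [reduceFix, dif_neg h, ih, foldl_stepA_repl3]

theorem repl3_reduceFix (t : List Char) : repl3 (reduceFix t) = reduceFix t := by
  induction t using reduceFix.induct with
  | case1 t h => rw [reduceFix, dif_pos h]; exact h
  | case2 t h ih => rw [reduceFix, dif_neg h]; exact ih

def isPair (a b : Char) : Prop :=
  (a = '[' ∧ b = ']') ∨ (a = '{' ∧ b = '}') ∨ (a = '(' ∧ b = ')')

def pairsFree : List Char → Prop
  | a :: b :: rest => ¬ isPair a b ∧ pairsFree (b :: rest)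
  | _ => True

theorem no_adj_of_fix (o c : Char) :
    ∀ t : List Char, dropPairs o c t = t →
      (match t with
       | a :: b :: _ => ¬ (a = o ∧ b = c)
       | _ => True) ∧
      (match t with
       | _ :: rest => dropPairs o c rest = rest
       | _ => True) := by
  intro t
  induction t using dropPairs.induct o c with
  | case1 a b rest hab ih =>
      intro hfix
      exfalso
      have hle := length_dropPairs_le o c rest
      rw [dropPairs, if_pos hab] at hfix
      have := congrArg List.length hfix
      simp only [List.length_cons] at this
      omega
  | case2 a b rest h ih =>
      intro hfix
      rw [dropPairs, if_neg h] at hfix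
      rw [List.cons.injEq] at hfix
      exact ⟨h, hfix.2⟩
  | case3 l h =>
      intro _
      match l with
      | [] => exact ⟨trivial, trivial⟩
      | [a] => exact ⟨trivial, rfl⟩
      | a :: b :: rest => exact absurd rfl (h a b rest)

theorem pairsFree_of_fixes :
    ∀ t : List Char,
      dropPairs '[' ']' t = t → dropPairs '{' '}' t = t → dropPairs '(' ')' t = t →
      pairsFree t := by
  intro t
  induction t with
  | nil => intro _ _ _; trivial
  | cons a rest ih =>
      intro h1 h2 h3
      have n1 := no_adj_of_fix '[' ']' (a :: rest) h1
      have n2 := no_adj_of_fix '{' '}' (a :: rest) h2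
      have n3 := no_adj_of_fix '(' ')' (a :: rest) h3
      match rest with
      | [] => trivial
      | b :: rest' =>
          refine ⟨?_, ih n1.2 n2.2 n3.2⟩
          intro hp
          rcases hp with ⟨ha, hb⟩ | ⟨ha, hb⟩ | ⟨ha, hb⟩
          · exact n1.1 ⟨ha, hb⟩
          · exact n2.1 ⟨ha, hb⟩
          · exact n3.1 ⟨ha, hb⟩

theorem pairsFree_boundary :
    ∀ (p : List Char) (a b : Char) (v : List Char),
      pairsFree (p ++ a :: b :: v) → ¬ isPair a b := by
  intro p
  induction p with
  | nil => intro a b v h; exact h.1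
  | cons x p ih =>
      intro a b v h
      match p, h with
      | [], h => exact h.2.1
      | y :: p', h => exact ih a b v h.2

theorem stepA_no_pop (q : List Char) (a j : Char) (hnp : ¬ isPair a j) :
    stepA (q ++ [a]) j = (q ++ [a]) ++ [j] := by
  have hl : (q ++ [a]).getLast? = some a := by simp
  unfold stepA
  rw [if_neg, if_neg, if_neg]
  · rintro ⟨hj, -, hla⟩
    rw [hl] at hla
    exact hnp (Or.inr (Or.inr ⟨by injection hla, hj⟩))
  · rintro ⟨hj, -, hla⟩
    rw [hl] at hla
    exact hnp (Or.inr (Or.inl ⟨by injection hla, hj⟩))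
  · rintro ⟨hj, -, hla⟩
    rw [hl] at hla
    exact hnp (Or.inl ⟨by injection hla, hj⟩)

-- if no adjacent matched pair exists anywhere, the stack machine never pops
theorem foldl_stepA_pairsFree :
    ∀ (r p : List Char), pairsFree (p ++ r) → r.foldl stepA p = p ++ r := by
  intro r
  induction r with
  | nil => intro p _; simp
  | cons j rest ih =>
      intro p hpf
      rcases List.eq_nil_or_concat p with rfl | ⟨q, a, rfl⟩
      · have hstep : stepA [] j = [j] := by simp [stepA]
        rw [List.foldl_cons, hstep]
        have := ih [j] (by simpa using hpf)
        simpa using this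
      · rw [List.concat_eq_append] at hpf ⊢
        have hnp : ¬ isPair a j :=
          pairsFree_boundary q a j rest (by simpa using hpf)
        rw [List.foldl_cons, stepA_no_pop q a j hnp]
        have := ih ((q ++ [a]) ++ [j]) (by simpa using hpf)
        simpa using this

-- A's stack run computes exactly B's reduction fixed point
theorem foldl_stepA_eq_reduceFix (t : List Char) :
    t.foldl stepA [] = reduceFix t := by
  rw [← foldl_stepA_reduceFix t []]
  obtain ⟨e1, e2, e3⟩ := repl3_fix_parts (reduceFix t) (repl3_reduceFix t)
  have hpf := pairsFree_of_fixes (reduceFix t) e1 e2 e3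
  have := foldl_stepA_pairsFree (reduceFix t) [] (by simpa using hpf)
  simpa using this

-- the two forms of the i-th rotation coincide
theorem rotation_eq (cs : List Char) (i : Int) (h0 : 0 ≤ i) (hn : i < (cs.length : Int)) :
    PySem.List.slice (cs ++ cs) (some i) (some (i + (cs.length : Int))) =
      PySem.List.slice cs (some i) none ++ PySem.List.slice cs none (some i) := by
  rw [PySem.List.slice_toNat _ h0 (by omega), PySem.List.slice_from _ h0,
      PySem.List.slice_to _ h0]
  have hk : i.toNat ≤ cs.length := by omega
  have hb : (i + (cs.length : Int)).toNat - i.toNat = cs.length := by omega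
  rw [hb, List.drop_append, Nat.sub_eq_zero_of_le hk, List.drop_zero, List.take_append]
  have hlen : (List.drop i.toNat cs).length = cs.length - i.toNat := by simp
  rw [List.take_of_length_le (by omega), hlen]
  congr 1
  congr 1
  omega

-- ===== VERDICT (by name: the statement is the Claim_ definition above) =====
theorem solution_spec : Claim_equal_solution := by
  intro s _
  unfold Spec_solution solution solution_alt
  apply PySem.List.foldl_congr_mem
  intro acc i hi
  rw [PySem.List.mem_pyRange_one] at hi
  simp only [rotation_eq s.toList i hi.1 hi.2, foldl_stepA_eq_reduceFix]
  by_cases h : reduceFix (PySem.List.slice s.toList (some i) none ++ PySem.List.slice s.toList none (some i)) = []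
  · rw [if_pos h, if_pos h]
  · rw [if_neg h, if_neg h]; ring
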